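-- pv_equiv track=rewrite | github.com/EmKalin/spd | lab1.py | calculate
-- ===== SOURCE A (Python) =====
-- def calculate(tablica,n):
--     S=[]
--     S.append(tablica[0][0])
--     C=[]
--     C.append(S[0]+tablica[0][1])
--     Cmax=C[0]+tablica[0][2]
--     for i in range (1,n):
--         S.append(max(tablica[i][0],C[i-1]))
--         C.append(S[i]+tablica[i][1])
--         Cmax=max(Cmax,C[i]+tablica[i][2])
--
--     return Cmax
-- ===== SOURCE B (Python) =====
-- def calculate(tablica, n):
--     # Closed form: C[i] = P[i+1] + max_{j<=i}(r_j - P[j]), where P is the prefix sum of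
--     # processing times; so no completion-time recurrence / table is needed, only three scalars.
--     P = tablica[0][1]                      # prefix sum of processing times (P[i+1])
--     M = tablica[0][0]                      # running max of r_j - P[j] (release-date slack)
--     best = P + M + tablica[0][2]
--     for i in range(1, n):
--         M = max(M, tablica[i][0] - P)
--         P = P + tablica[i][1]
--         best = max(best, P + M + tablica[i][2])
--     return best
-- ===== Notes on version B (the rewrite author's own statement) =====
-- stated objective: alternative
-- what changed: A runs the DP recurrence C[i]=max(r_i,C[i-1])+p_i while growing the lists S and C and tracking a running Cmax; B eliminates the recurrence and the lists entirely via the closed form C[i]=P[i+1]+max_{j<=i}(r_j-P[j]), maintaining only three scalars: the prefix sum of processing times, the running max of release-date slack r_j-P[j], and the best objective value.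
import Mathlib
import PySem

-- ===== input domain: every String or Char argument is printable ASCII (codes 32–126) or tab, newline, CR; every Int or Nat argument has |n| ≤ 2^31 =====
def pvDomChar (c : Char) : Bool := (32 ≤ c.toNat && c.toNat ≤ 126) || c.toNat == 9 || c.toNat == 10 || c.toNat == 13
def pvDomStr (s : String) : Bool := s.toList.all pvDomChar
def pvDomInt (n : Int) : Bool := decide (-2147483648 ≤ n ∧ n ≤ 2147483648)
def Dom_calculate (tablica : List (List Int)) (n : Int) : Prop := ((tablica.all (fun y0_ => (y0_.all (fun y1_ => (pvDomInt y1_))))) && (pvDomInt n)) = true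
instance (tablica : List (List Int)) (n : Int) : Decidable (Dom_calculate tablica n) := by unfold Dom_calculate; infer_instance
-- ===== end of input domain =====

-- B replaces A's DP recurrence over growing lists S/C by the closed form C[i] = P[i+1] + max_{j<=i}(r_j - P[j])
-- using a prefix sum and a running slack maximum (three scalars); proved to return the same value on Pre_.


-- shared cell access: tablica[i][j] (total form; Pre_ guarantees the indices are in range)
def pvCell (t : List (List Int)) (i j : Int) : Int :=
  PySem.List.pyGetD (PySem.List.pyGetD t i []) j 0

-- ===== PORT A =====
-- one loop step of A: appends to S, appends to C, updates the running Cmax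
def stepA (t : List (List Int)) (st : List Int × List Int × Int) (i : Int) :
    List Int × List Int × Int :=
  let S := st.1 ++ [max (pvCell t i 0) (PySem.List.pyGetD st.2.1 (i - 1) 0)]
  let C := st.2.1 ++ [PySem.List.pyGetD S i 0 + pvCell t i 1]
  let Cmax := max st.2.2 (PySem.List.pyGetD C i 0 + pvCell t i 2)
  (S, C, Cmax)

def calculate (tablica : List (List Int)) (n : Int) : Int :=
  let S : List Int := [] ++ [pvCell tablica 0 0]
  let C : List Int := [] ++ [PySem.List.pyGetD S 0 0 + pvCell tablica 0 1]
  let Cmax : Int := PySem.List.pyGetD C 0 0 + pvCell tablica 0 2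
  ((PySem.List.pyRange 1 n 1).foldl (stepA tablica) (S, C, Cmax)).2.2

-- ===== PORT B =====
-- Source B loop body: M = max(M, r_i - P); P = P + p_i; best = max(best, P + M + q_i)
def stepB (t : List (List Int)) (st : Int × Int × Int) (i : Int) : Int × Int × Int :=
  let M := max st.2.1 (pvCell t i 0 - st.1)
  let P := st.1 + pvCell t i 1
  let best := max st.2.2 (P + M + pvCell t i 2)
  (P, M, best)

def calculate_alt (tablica : List (List Int)) (n : Int) : Int :=
  let P : Int := pvCell tablica 0 1
  let M : Int := pvCell tablica 0 0
  let best : Int := P + M + pvCell tablica 0 2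
  ((PySem.List.pyRange 1 n 1).foldl (stepB tablica) (P, M, best)).2.2

-- ===== PRECONDITION & SPEC =====
-- Pre_ excludes exactly the inputs on which Python A raises IndexError: an empty tablica, a row 0
-- with fewer than 3 entries, or some i in range(1, n) with tablica[i] missing or shorter than 3.
def Pre_calculate (tablica : List (List Int)) (n : Int) : Prop :=
  tablica ≠ [] ∧ 3 ≤ (tablica.getD 0 []).length ∧
  (1 < n → n ≤ (tablica.length : Int)) ∧
  ∀ r ∈ tablica.take n.toNat, 3 ≤ r.length
instance (tablica : List (List Int)) (n : Int) : Decidable (Pre_calculate tablica n) := by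
  unfold Pre_calculate; infer_instance
def pvWitness_calculate : List (List Int) × Int := ([[1, 2, 3], [2, 1, 4]], 2)

def Spec_calculate (tablica : List (List Int)) (n : Int) (out : Int) : Prop := out = calculate_alt tablica n
instance (tablica : List (List Int)) (n : Int) (out : Int) : Decidable (Spec_calculate tablica n out) := by unfold Spec_calculate; infer_instance

-- ===== CLAIM (what is proved, stated in full; the proofs are below) =====
def Claim_equal_calculate : Prop := ∀ (tablica : List (List Int)) (n : Int), Dom_calculate tablica n → Pre_calculate tablica n → Spec_calculate tablica n (calculate tablica n)

-- ===== LEMMAS AND PROOFS =====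

lemma pyGetD_concat_length (C : List Int) (x : Int) (d : Int) (i : Int)
    (hi : i = (C.length : Int)) :
    PySem.List.pyGetD (C ++ [x]) i d = x := by
  rw [PySem.List.pyGetD_eq_getElem _ d (by omega) (by simp; omega)]
  exact List.getElem_concat_length (by omega) _

-- invariant linking A's fused list loop to B's scalar loop: after the fold over range(1,k),
-- A's lists have length k, the last entry of C equals B's P + M, and A's Cmax equals B's best
lemma loop_invariant (t : List (List Int)) (k : Int) (hk : 1 ≤ k) :
    (let stA := (PySem.List.pyRange 1 k 1).foldl (stepA t)
        ([pvCell t 0 0],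
         [PySem.List.pyGetD [pvCell t 0 0] 0 0 + pvCell t 0 1],
         PySem.List.pyGetD [PySem.List.pyGetD [pvCell t 0 0] 0 0 + pvCell t 0 1] 0 0 + pvCell t 0 2);
     let stB := (PySem.List.pyRange 1 k 1).foldl (stepB t)
        (pvCell t 0 1, pvCell t 0 0, pvCell t 0 1 + pvCell t 0 0 + pvCell t 0 2);
     stA.1.length = k.toNat ∧ stA.2.1.length = k.toNat ∧
     PySem.List.pyGetD stA.2.1 (k - 1) 0 = stB.1 + stB.2.1 ∧
     stA.2.2 = stB.2.2) := by
  induction k, hk using Int.le_induction with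
  | base =>
    rw [PySem.List.pyRange_one_eq_nil le_rfl]
    refine ⟨rfl, rfl, ?_, by simp [PySem.List.pyGetD_zero_cons]; omega⟩
    simp [PySem.List.pyGetD_zero_cons]; omega
  | succ k hk ih =>
    obtain ⟨ihS, ihC, ihLast, ihMax⟩ := ih
    rw [PySem.List.pyRange_one_succ_right (by omega)] at *
    simp only [List.foldl_append] at *
    set stA := (PySem.List.pyRange 1 k 1).foldl (stepA t)
        ([pvCell t 0 0],
         [PySem.List.pyGetD [pvCell t 0 0] 0 0 + pvCell t 0 1],
         PySem.List.pyGetD [PySem.List.pyGetD [pvCell t 0 0] 0 0 + pvCell t 0 1] 0 0 + pvCell t 0 2)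
      with hstA
    set stB := (PySem.List.pyRange 1 k 1).foldl (stepB t)
        (pvCell t 0 1, pvCell t 0 0, pvCell t 0 1 + pvCell t 0 0 + pvCell t 0 2)
      with hstB
    simp only [List.foldl_cons, List.foldl_nil, stepA, stepB]
    have hSidx : PySem.List.pyGetD
        (stA.1 ++ [max (pvCell t k 0) (PySem.List.pyGetD stA.2.1 (k - 1) 0)]) k 0 =
        max (pvCell t k 0) (PySem.List.pyGetD stA.2.1 (k - 1) 0) := by
      apply pyGetD_concat_length; rw [ihS]; omega
    have hCidx : ∀ x : Int, PySem.List.pyGetD (stA.2.1 ++ [x]) k 0 = x := by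
      intro x; apply pyGetD_concat_length; rw [ihC]; omega
    refine ⟨by simp [ihS]; omega, by simp [ihC]; omega, ?_, ?_⟩
    · rw [show k + 1 - 1 = k by omega, hCidx, hSidx, ihLast]
      have : max (pvCell t k 0) (stB.1 + stB.2.1) + pvCell t k 1
           = stB.1 + pvCell t k 1 + max stB.2.1 (pvCell t k 0 - stB.1) := by omega
      exact this
    · rw [hCidx, hSidx, ihLast, ihMax]
      congr 1
      omega

-- ===== VERDICT (by name: the statement is the Claim_ definition above) =====
theorem calculate_spec : Claim_equal_calculate := by
  intro t n _ _
  unfold Spec_calculate calculate calculate_alt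
  simp only [List.nil_append]
  by_cases hn : 1 ≤ n
  · have h := (loop_invariant t n hn).2.2.2
    simp only at h
    rw [h]
  · rw [PySem.List.pyRange_one_eq_nil (by omega)]
    simp [PySem.List.pyGetD_zero_cons]; omega
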